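-- pv_equiv track=rewrite | github.com/RadoslavSmarzik/Snarky-Diplomova-praca | src/graph.py | renumber_verticies_after_deleting
-- ===== SOURCE A (Python) =====
-- def renumber_verticies_after_deleting(free_array, delete_array):
--     delete_array.sort(reverse=True)
--     new_array = []
--     for element in free_array:
--         new_element = element
--         for i in range(len(delete_array)):
--             if element > delete_array[i]:
--                 new_element = new_element - 1
--         new_array.append(new_element)
--     return new_array
-- ===== SOURCE B (Python) =====
-- # Return-value-equivalent re-implementation: sort delete_array once (ascending, into a copy)
-- # and binary-search the count of smaller deleted vertices per element, O((n+m) log m) instead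
-- # of A's O(n*m). NOTE: A sorts delete_array in place (descending); B leaves it unchanged --
-- # the equivalence claimed is about the return value only.
-- def renumber_verticies_after_deleting(free_array, delete_array):
--     ds = sorted(delete_array)
--     n = len(ds)
--
--     def count_less(x):
--         lo, hi = 0, n
--         while lo < hi:
--             mid = (lo + hi) // 2
--             if ds[mid] < x:
--                 lo = mid + 1
--             else:
--                 hi = mid
--         return lo
--
--     return [e - count_less(e) for e in free_array]
-- ===== Notes on version B (the rewrite author's own statement) =====
-- stated objective: faster
-- what changed: Replaces A's inner scan of the whole (descending-sorted) delete list for every vertex by one ascending sort plus a per-vertex binary search counting smaller deleted vertices; B also leaves delete_array unmutated (A sorts it in place), return values are identical.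
import Mathlib
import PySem

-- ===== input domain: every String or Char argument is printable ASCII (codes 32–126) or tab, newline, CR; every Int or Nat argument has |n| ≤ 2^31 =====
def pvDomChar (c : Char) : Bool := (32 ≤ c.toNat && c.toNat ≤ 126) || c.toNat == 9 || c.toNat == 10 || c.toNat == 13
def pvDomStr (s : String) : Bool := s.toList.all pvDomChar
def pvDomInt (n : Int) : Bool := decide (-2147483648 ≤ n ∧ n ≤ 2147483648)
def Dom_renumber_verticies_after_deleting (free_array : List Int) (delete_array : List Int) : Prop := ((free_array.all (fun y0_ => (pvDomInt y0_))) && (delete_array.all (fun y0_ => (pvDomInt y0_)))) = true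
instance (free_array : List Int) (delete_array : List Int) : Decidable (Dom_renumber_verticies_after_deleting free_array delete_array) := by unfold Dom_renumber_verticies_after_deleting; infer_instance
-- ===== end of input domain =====

-- B replaces A's per-vertex scan of the delete list by one ascending sort plus a binary
-- search per vertex (objective: faster, measured). A sorts delete_array in place while B
-- does not: the equivalence proved here is about the RETURN value only.


-- ===== PORT A =====
-- Port of A: sort delete_array descending, then for every element scan the whole
-- sorted list by index, decrementing once per smaller deleted vertex.
def renumber_verticies_after_deleting (free_array : List Int) (delete_array : List Int) : List Int :=
  let d := PySem.List.sorted delete_array (fun x => x) true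
  free_array.foldl (fun new_array element =>
    new_array ++ [(PySem.List.pyRange 0 (d.length : Int) 1).foldl
      (fun new_element i => if element > PySem.List.pyGetD d i 0 then new_element - 1 else new_element)
      element]) []

-- ===== PORT B =====
-- Port of B's hand-written binary search (the while lo < hi loop of Source B);
-- lo/hi/mid are nonnegative throughout in Python, so they are Nat here and
-- Python's (lo+hi)//2 is Nat division; ds[mid] is always in range (lo ≤ mid < hi ≤ len).
def pvCountLess (ds : List Int) (x : Int) (lo hi : Nat) : Nat :=
  if lo < hi then
    let mid := (lo + hi) / 2
    if ds.getD mid 0 < x then pvCountLess ds x (mid + 1) hi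
    else pvCountLess ds x lo mid
  else lo
termination_by hi - lo
decreasing_by all_goals omega

-- Port of B: sort ascending once, subtract the binary-searched count per element.
-- (Return value only: A sorts delete_array in place, B does not.)
def renumber_verticies_after_deleting_alt (free_array : List Int) (delete_array : List Int) : List Int :=
  let ds := PySem.List.sorted delete_array (fun x => x) false
  free_array.map (fun e => e - (pvCountLess ds e 0 ds.length : Int))

-- ===== PRECONDITION & SPEC =====
def Spec_renumber_verticies_after_deleting (free_array : List Int) (delete_array : List Int) (out : List Int) : Prop := out = renumber_verticies_after_deleting_alt free_array delete_array
instance (free_array : List Int) (delete_array : List Int) (out : List Int) : Decidable (Spec_renumber_verticies_after_deleting free_array delete_array out) := by unfold Spec_renumber_verticies_after_deleting; infer_instance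

-- ===== CLAIM (what is proved, stated in full; the proofs are below) =====
def Claim_equal_renumber_verticies_after_deleting : Prop := ∀ (free_array : List Int) (delete_array : List Int), Dom_renumber_verticies_after_deleting free_array delete_array → Spec_renumber_verticies_after_deleting free_array delete_array (renumber_verticies_after_deleting free_array delete_array)

-- ===== LEMMAS AND PROOFS =====

-- A's inner loop subtracts 1 from the accumulator once per element below `e`.
lemma pv_foldl_dec (e : Int) (l : List Int) (init : Int) :
    l.foldl (fun ne dd => if e > dd then ne - 1 else ne) init
      = init - (l.countP (fun dd => decide (dd < e)) : Int) := by
  induction l generalizing init with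
  | nil => simp
  | cons a t ih =>
    simp only [List.foldl_cons, List.countP_cons, ih]
    by_cases h : a < e <;> simp [h] <;> omega

-- In a (≤)-sorted list, position i holds a value below x iff i is below the count of such values.
lemma pv_sorted_lt_iff (ds : List Int) (x : Int) (hp : ds.Pairwise (· ≤ ·)) :
    ∀ i : Nat, (hi : i < ds.length) → (ds[i] < x ↔ i < ds.countP (fun d => decide (d < x))) := by
  induction ds with
  | nil => intro i hi; simp at hi
  | cons a t ih =>
    rcases List.pairwise_cons.mp hp with ⟨ha, ht⟩
    intro i hi
    have hcnt0 : ¬ a < x → t.countP (fun d => decide (d < x)) = 0 := by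
      intro hax
      refine List.countP_eq_zero.mpr ?_
      intro d hd
      simp only [decide_eq_true_eq]
      exact fun hdx => hax (lt_of_le_of_lt (ha d hd) hdx)
    cases i with
    | zero =>
      by_cases hax : a < x
      · simp [hax]
      · simp [hax, hcnt0 hax]
    | succ j =>
      have hj : j < t.length := by simpa using hi
      by_cases hax : a < x
      · simpa [List.countP_cons, hax, Nat.succ_lt_succ_iff] using ih ht j hj
      · have hcz : (a :: t).countP (fun d => decide (d < x)) = 0 := by
          simp [hax, hcnt0 hax]
        have hnlt : ¬ t[j] < x := fun h => hax (lt_of_le_of_lt (ha _ (List.getElem_mem hj)) h)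
        simp [hcz, hnlt]

-- The binary search returns the count of elements below x, from any bracket [lo, hi] around it.
lemma pv_countLess_eq (ds : List Int) (x : Int) (hp : ds.Pairwise (· ≤ ·)) :
    ∀ lo hi : Nat, hi ≤ ds.length → lo ≤ ds.countP (fun d => decide (d < x)) →
      ds.countP (fun d => decide (d < x)) ≤ hi →
      pvCountLess ds x lo hi = ds.countP (fun d => decide (d < x)) := by
  intro lo hi
  induction h : hi - lo using Nat.strong_induction_on generalizing lo hi with
  | _ n ih =>
    intro hhi hlo hc
    rw [pvCountLess]
    by_cases hlh : lo < hi
    · simp only [hlh, if_true]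
      have hmid1 : lo ≤ (lo + hi) / 2 := by omega
      have hmid2 : (lo + hi) / 2 < hi := by omega
      have hmlen : (lo + hi) / 2 < ds.length := by omega
      have hget : ds.getD ((lo + hi) / 2) 0 = ds[(lo + hi) / 2] := List.getD_eq_getElem ds 0 hmlen
      by_cases hlt : ds.getD ((lo + hi) / 2) 0 < x
      · have := (pv_sorted_lt_iff ds x hp _ hmlen).mp (by rwa [hget] at hlt)
        simp only [hlt, if_true]
        exact ih (hi - ((lo + hi) / 2 + 1)) (by omega) _ _ rfl hhi (by omega) hc
      · have := (pv_sorted_lt_iff ds x hp _ hmlen).not.mp (by rwa [hget] at hlt)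
        simp only [hlt, if_false]
        exact ih ((lo + hi) / 2 - lo) (by omega) _ _ rfl (by omega) hlo (by omega)
    · simp only [hlh, if_false]
      omega

-- ===== VERDICT (by name: the statement is the Claim_ definition above) =====
theorem renumber_verticies_after_deleting_spec : Claim_equal_renumber_verticies_after_deleting := by
  intro free_array delete_array _
  unfold Spec_renumber_verticies_after_deleting
  unfold renumber_verticies_after_deleting renumber_verticies_after_deleting_alt
  simp only []
  rw [PySem.List.foldl_append_singleton_eq_map]
  apply List.map_congr_left
  intro e _
  rw [PySem.List.foldl_pyRange_zero_pyGetD' (PySem.List.sorted delete_array (fun x => x) true) 0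
        (fun ne dd => if e > dd then ne - 1 else ne) e]
  rw [pv_foldl_dec]
  congr 1
  have h1 : (PySem.List.sorted delete_array (fun x => x) true).countP (fun dd => decide (dd < e))
      = delete_array.countP (fun dd => decide (dd < e)) :=
    (PySem.List.sorted_perm delete_array (fun x => x) true).countP_eq _
  have h2 : (PySem.List.sorted delete_array (fun x => x) false).countP (fun dd => decide (dd < e))
      = delete_array.countP (fun dd => decide (dd < e)) :=
    (PySem.List.sorted_perm delete_array (fun x => x) false).countP_eq _
  rw [h1, pv_countLess_eq (PySem.List.sorted delete_array (fun x => x) false) e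
        (by simpa using PySem.List.sorted_pairwise delete_array (fun x => x)) 0
        (PySem.List.sorted delete_array (fun x => x) false).length
        le_rfl (Nat.zero_le _) List.countP_le_length, h2]
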